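-- pv_equiv track=rewrite | github.com/SamboStefano-Samborum/prog_sambostefano | prs2_dataset.py | streaknumber_int
-- ===== SOURCE A (Python) =====
-- def streaknumber_int(modified_events): #list:events -> int:streaks
--     if len(modified_events) < 3:
--         return 0  #se la lista ha meno di 3 elementi significa che il giocatore ha tirato meno di 3 volte, quindi non può avere completato una streak
--     streak_count = 0  #imposto il counter
--     for i in range(len(modified_events) - 2):  #scorro la lista
--         if modified_events[i] == modified_events[i + 1] == modified_events[i + 2]: #se per ogni elemento i successivi 2 sono uguali -> streak
--             streak_count += 1
-- #DISCLAIMER: la definizione di "streaky shooter" si applica sia a canestri che a errori consecutivi, perciò non mi interessa dividere le 2 cose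
--     return streak_count
-- ===== SOURCE B (Python) =====
-- def streaknumber_int(modified_events):
--     total = 0
--     run = 0
--     prev = None
--     have_prev = False
--     for x in modified_events:
--         if have_prev and x == prev:
--             run += 1
--         else:
--             total += max(run - 2, 0)
--             prev = x
--             run = 1
--             have_prev = True
--     total += max(run - 2, 0)
--     return total
-- ===== Notes on version B (the rewrite author's own statement) =====
-- stated objective: idiomatic
-- what changed: Replaced the index-based scan over overlapping windows a[i]==a[i+1]==a[i+2] by a single run-length pass that groups maximal runs of equal elements and adds max(L-2,0) per run of length L.
import Mathlib
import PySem

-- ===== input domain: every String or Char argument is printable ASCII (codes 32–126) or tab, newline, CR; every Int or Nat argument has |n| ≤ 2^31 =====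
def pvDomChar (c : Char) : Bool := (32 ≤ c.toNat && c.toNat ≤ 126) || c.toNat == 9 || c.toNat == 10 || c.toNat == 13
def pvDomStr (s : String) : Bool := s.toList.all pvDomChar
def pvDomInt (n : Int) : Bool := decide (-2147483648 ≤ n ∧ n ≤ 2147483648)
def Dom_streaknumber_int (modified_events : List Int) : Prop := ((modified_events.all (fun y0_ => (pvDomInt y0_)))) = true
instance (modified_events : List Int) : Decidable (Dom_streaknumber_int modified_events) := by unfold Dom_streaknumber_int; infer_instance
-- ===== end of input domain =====

-- B replaces the overlapping-window index scan by a single run-length pass (idiomatic grouping); same O(n) cost.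

-- ===== PORT A =====
def streaknumber_int (modified_events : List Int) : Int :=
  if (modified_events.length : Int) < 3 then 0
  else
    (PySem.List.pyRange 0 ((modified_events.length : Int) - 2) 1).foldl
      (fun streak_count i =>
        if PySem.List.pyGetD modified_events i 0 = PySem.List.pyGetD modified_events (i + 1) 0 ∧
           PySem.List.pyGetD modified_events (i + 1) 0 = PySem.List.pyGetD modified_events (i + 2) 0
        then streak_count + 1 else streak_count) 0

-- ===== PORT B =====
-- run-length pass: prev = none ↔ have_prev is False in Source B
def streakAltGo : List Int → Option Int → Int → Int → Int
  | [], _, run, total => total + max (run - 2) 0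
  | x :: xs, prev, run, total =>
    if some x = prev then streakAltGo xs prev (run + 1) total
    else streakAltGo xs (some x) 1 (total + max (run - 2) 0)

def streaknumber_int_alt (modified_events : List Int) : Int :=
  streakAltGo modified_events none 0 0

-- ===== PRECONDITION & SPEC =====
def Spec_streaknumber_int (modified_events : List Int) (out : Int) : Prop := out = streaknumber_int_alt modified_events
instance (modified_events : List Int) (out : Int) : Decidable (Spec_streaknumber_int modified_events out) := by unfold Spec_streaknumber_int; infer_instance

-- ===== CLAIM (what is proved, stated in full; the proofs are below) =====
def Claim_equal_streaknumber_int : Prop := ∀ (modified_events : List Int), Dom_streaknumber_int modified_events → Spec_streaknumber_int modified_events (streaknumber_int modified_events)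

-- ===== LEMMAS AND PROOFS =====

/-- Canonical count of equal consecutive triples. -/
def pvTriples : List Int → Int
  | a :: b :: c :: rest => (if a = b ∧ b = c then 1 else 0) + pvTriples (b :: c :: rest)
  | _ => 0

theorem pvTriples_replicate (p : Int) : ∀ r : Nat, pvTriples (List.replicate r p) = max ((r : Int) - 2) 0 := by
  intro r
  induction r with
  | zero => simp [pvTriples]
  | succ s ih =>
    match s, ih with
    | 0, _ => simp [pvTriples]
    | 1, _ => simp [pvTriples]
    | (u+2), ih =>
      have h : List.replicate (u+3) p = p :: p :: p :: List.replicate u p := by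
        simp [List.replicate_succ]
      have h2 : List.replicate (u+2) p = p :: p :: List.replicate u p := by
        simp [List.replicate_succ]
      rw [h, pvTriples, ← h2, ih]
      push_cast
      omega

theorem pvTriples_replicate_append (p : Int) (xs : List Int) (hx : xs.head? ≠ some p) :
    ∀ r : Nat, pvTriples (List.replicate r p ++ xs) = max ((r : Int) - 2) 0 + pvTriples xs := by
  intro r
  induction r with
  | zero => simp
  | succ s ih =>
    match s, ih with
    | 0, _ =>
      match xs, hx with
      | [], _ => simp [pvTriples]
      | [a], _ => simp [pvTriples]
      | a :: c :: t, hx =>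
        have hap : p ≠ a := by intro h; exact hx (by simp [h])
        simp [pvTriples, hap]
    | 1, ih =>
      match xs, hx with
      | [], _ => simp [pvTriples]
      | a :: t, hx =>
        have hap : p ≠ a := by intro h; exact hx (by simp [h])
        have h1 : List.replicate 2 p ++ a :: t = p :: p :: a :: t := by simp [List.replicate_succ]
        have h2 : (List.replicate 1 p ++ a :: t) = p :: a :: t := by simp
        rw [h1, pvTriples, ← h2, ih]
        simp [hap]
    | (u+2), ih =>
      have h : List.replicate (u+3) p ++ xs = p :: p :: p :: (List.replicate u p ++ xs) := by
        simp [List.replicate_succ]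
      have h2 : List.replicate (u+2) p ++ xs = p :: p :: (List.replicate u p ++ xs) := by
        simp [List.replicate_succ]
      rw [h, pvTriples, ← h2, ih]
      push_cast
      omega

theorem streakAltGo_inv : ∀ (xs : List Int) (p : Int) (r : Nat) (total : Int),
    streakAltGo xs (some p) (r : Int) total = total + pvTriples (List.replicate r p ++ xs) := by
  intro xs
  induction xs with
  | nil =>
    intro p r total
    simp [streakAltGo, pvTriples_replicate]
  | cons x t ih =>
    intro p r total
    by_cases hxp : x = p
    · subst hxp
      rw [streakAltGo]
      simp only [if_pos rfl]
      have hcast : ((r : Int) + 1) = ((r + 1 : Nat) : Int) := by push_cast; ring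
      rw [hcast, ih x (r+1) total, List.replicate_succ']
      simp
    · rw [streakAltGo]
      have hne : ¬ (some x = some p) := by simp [hxp]
      rw [if_neg hne]
      have h1 : (1 : Int) = ((1 : Nat) : Int) := rfl
      rw [h1, ih x 1 (total + max ((r:Int) - 2) 0)]
      have hhead : (x :: t).head? ≠ some p := by simp [hxp]
      rw [pvTriples_replicate_append p (x :: t) hhead r]
      simp [pvTriples]
      ring

theorem alt_eq_pvTriples (xs : List Int) : streaknumber_int_alt xs = pvTriples xs := by
  cases xs with
  | nil => simp [streaknumber_int_alt, streakAltGo, pvTriples]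
  | cons x t =>
    rw [streaknumber_int_alt, streakAltGo]
    simp only [reduceCtorEq]
    have h1 : (1 : Int) = ((1 : Nat) : Int) := rfl
    rw [h1, streakAltGo_inv t x 1 (0 + max (0 - 2) 0)]
    simp

theorem a_foldl_count (xs : List Int) : ∀ c : Int,
    (List.range (xs.length - 2)).foldl
      (fun acc k =>
        if xs.getD k 0 = xs.getD (k+1) 0 ∧ xs.getD (k+1) 0 = xs.getD (k+2) 0
        then acc + 1 else acc) c = c + pvTriples xs := by
  induction xs with
  | nil => intro c; simp [pvTriples]
  | cons a t ih =>
    intro c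
    match t, ih with
    | [], _ => simp [pvTriples]
    | [b], _ => simp [pvTriples]
    | b :: cc :: t3, ih =>
      have hlen : (a :: b :: cc :: t3).length - 2 = t3.length + 1 := by simp
      rw [hlen, List.range_succ_eq_map, List.foldl_cons, List.foldl_map]
      have hstep : (fun (acc : Int) (k : Nat) =>
          if (a :: b :: cc :: t3).getD (k+1) 0 = (a :: b :: cc :: t3).getD (k+1+1) 0 ∧
             (a :: b :: cc :: t3).getD (k+1+1) 0 = (a :: b :: cc :: t3).getD (k+1+2) 0
          then acc + 1 else acc) =
          (fun (acc : Int) (k : Nat) =>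
          if (b :: cc :: t3).getD k 0 = (b :: cc :: t3).getD (k+1) 0 ∧
             (b :: cc :: t3).getD (k+1) 0 = (b :: cc :: t3).getD (k+2) 0
          then acc + 1 else acc) := by
        funext acc k
        simp
      have hlent : (b :: cc :: t3).length - 2 = t3.length := by simp
      rw [hstep, ← hlent, ih, pvTriples]
      have g0 : (a :: b :: cc :: t3).getD 0 0 = a := rfl
      have g1 : (a :: b :: cc :: t3).getD (0+1) 0 = b := rfl
      have g2 : (a :: b :: cc :: t3).getD (0+2) 0 = cc := rfl
      rw [g0, g1, g2]
      split_ifs <;> ring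

theorem a_eq_pvTriples (xs : List Int) : streaknumber_int xs = pvTriples xs := by
  by_cases h : (xs.length : Int) < 3
  · rw [streaknumber_int, if_pos h]
    match xs with
    | [] => simp [pvTriples]
    | [a] => simp [pvTriples]
    | [a, b] => simp [pvTriples]
    | a :: b :: c :: t => simp at h; omega
  · rw [streaknumber_int, if_neg h]
    rw [PySem.List.pyRange_one]
    have htn : (((xs.length : Int) - 2 - 0)).toNat = xs.length - 2 := by omega
    rw [htn, List.foldl_map]
    have hstep : (fun (acc : Int) (k : Nat) =>
        if PySem.List.pyGetD xs (0 + (k : Int)) 0 = PySem.List.pyGetD xs (0 + (k : Int) + 1) 0 ∧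
           PySem.List.pyGetD xs (0 + (k : Int) + 1) 0 = PySem.List.pyGetD xs (0 + (k : Int) + 2) 0
        then acc + 1 else acc) =
        (fun (acc : Int) (k : Nat) =>
        if xs.getD k 0 = xs.getD (k+1) 0 ∧ xs.getD (k+1) 0 = xs.getD (k+2) 0
        then acc + 1 else acc) := by
      funext acc k
      have e1 : (0 + (k : Int)) = ((k : Nat) : Int) := by push_cast; ring
      rw [e1]
      have e2 : ((k : Int) + 1) = (((k+1 : Nat)) : Int) := by push_cast; ring
      have e3 : ((k : Int) + 2) = (((k+2 : Nat)) : Int) := by push_cast; ring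
      rw [e2, e3]
      simp only [PySem.List.pyGetD_natCast]
    rw [hstep, a_foldl_count xs 0]
    simp

-- ===== VERDICT (by name: the statement is the Claim_ definition above) =====
theorem streaknumber_int_spec : Claim_equal_streaknumber_int := by
  intro xs _
  unfold Spec_streaknumber_int
  rw [a_eq_pvTriples, alt_eq_pvTriples]
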